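-- pv_equiv track=rewrite | github.com/gregoryann/Python-Beginner-Examples | Advent-of-Code/2019/day3/day3/day3_solution.py | intersection_with_sums
-- ===== SOURCE A (Python) =====
-- def intersection_with_sums(lst1, lst2):
--     """
--     Finds the intersections between two lists along with the sum of indexes
--     Very slow version
--     """
--     common_points = []
--     for i, coord in enumerate(lst1):
--         try:
--             j = lst2.index(coord)
--             if j > 0:
--                 common_points.append((coord, i+j))
--         except ValueError:
--             pass
--     return common_points
-- ===== SOURCE B (Python) =====
-- def intersection_with_sums(lst1, lst2):
--     """
--     Index-join-sort version: map each coordinate of lst2 to its first index,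
--     map each coordinate of lst1 to the list of ALL its indices, emit one whole
--     group per distinct lst2 coordinate, then sort the pairs back into lst1
--     order and drop the sort keys.
--     """
--     first = {}                       # coord -> first index in lst2
--     for j, coord in enumerate(lst2):
--         first.setdefault(coord, j)
--     occ = {}                         # coord -> all indices in lst1
--     for i, coord in enumerate(lst1):
--         occ.setdefault(coord, []).append(i)
--     out = [(i, (coord, i + j))
--            for coord, j in first.items() if j > 0
--            for i in occ.get(coord, [])]
--     out.sort(key=lambda t: t[0])
--     return [p for _, p in out]
-- ===== Notes on version B (the rewrite author's own statement) =====
-- stated objective: faster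
-- what changed: Replaces A's per-element linear scan of lst2 with an inverted index-join: an occurrence index of lst1 (coord -> all its indices) joined against the distinct coords of lst2 (coord -> first index), emitting whole groups per lst2 coordinate and restoring lst1 order with a final sort.
import Mathlib
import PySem

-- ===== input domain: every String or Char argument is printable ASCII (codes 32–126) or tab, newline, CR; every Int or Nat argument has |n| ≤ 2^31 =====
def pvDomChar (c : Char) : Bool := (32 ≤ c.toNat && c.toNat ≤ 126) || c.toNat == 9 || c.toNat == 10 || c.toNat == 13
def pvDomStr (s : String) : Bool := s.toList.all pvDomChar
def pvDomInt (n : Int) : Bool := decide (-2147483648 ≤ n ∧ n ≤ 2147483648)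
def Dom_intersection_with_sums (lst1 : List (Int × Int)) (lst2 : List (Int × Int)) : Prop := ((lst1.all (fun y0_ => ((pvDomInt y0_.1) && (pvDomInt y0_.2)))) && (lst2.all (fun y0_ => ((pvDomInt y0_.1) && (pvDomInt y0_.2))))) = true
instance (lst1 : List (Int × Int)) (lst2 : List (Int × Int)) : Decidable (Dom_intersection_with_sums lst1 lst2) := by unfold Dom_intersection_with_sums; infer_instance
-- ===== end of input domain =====

-- B replaces A's per-element scan of lst2 by an inverted index-join (occurrence index of lst1
-- joined against the distinct coords of lst2, then a sort back into lst1 order): objective 'faster'.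


-- ===== PORT A =====
-- for i, coord in enumerate(lst1): j = lst2.index(coord) (ValueError -> skip); if j > 0: append (coord, i+j)
def intersection_with_sums (lst1 : List (Int × Int)) (lst2 : List (Int × Int)) : List ((Int × Int) × Int) :=
  (PySem.List.enumerate lst1 0).foldl (fun common_points ic =>
    match PySem.List.index? lst2 ic.2 with
    | some j => if (j : Int) > 0 then common_points ++ [(ic.2, ic.1 + (j : Int))] else common_points
    | none => common_points) []

-- ===== PORT B =====
-- first = {}; for j, coord in enumerate(lst2): first.setdefault(coord, j)
def pvFirst (lst2 : List (Int × Int)) : PySem.Dict (Int × Int) Int :=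
  (PySem.List.enumerate lst2 0).foldl (fun d jc => d.setdefault jc.2 jc.1) PySem.Dict.empty

-- occ = {}; for i, coord in enumerate(lst1): occ.setdefault(coord, []).append(i)
def pvOcc (lst1 : List (Int × Int)) : PySem.Dict (Int × Int) (List Int) :=
  (PySem.List.enumerate lst1 0).foldl (fun d ic => d.modify ic.2 [] (· ++ [ic.1])) PySem.Dict.empty

-- out = [(i, (coord, i+j)) for coord, j in first.items() if j > 0 for i in occ.get(coord, [])]
-- out.sort(key=lambda t: t[0]); return [p for _, p in out]
def intersection_with_sums_alt (lst1 : List (Int × Int)) (lst2 : List (Int × Int)) : List ((Int × Int) × Int) :=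
  let first := pvFirst lst2
  let occ := pvOcc lst1
  let out := first.items.flatMap (fun cj =>
    if cj.2 > 0 then (occ.getD cj.1 []).map (fun i => (i, (cj.1, i + cj.2))) else [])
  (PySem.List.sorted out (fun t => t.1) false).map (·.2)

-- ===== PRECONDITION & SPEC =====
def Spec_intersection_with_sums (lst1 : List (Int × Int)) (lst2 : List (Int × Int)) (out : List ((Int × Int) × Int)) : Prop := out = intersection_with_sums_alt lst1 lst2
instance (lst1 : List (Int × Int)) (lst2 : List (Int × Int)) (out : List ((Int × Int) × Int)) : Decidable (Spec_intersection_with_sums lst1 lst2 out) := by unfold Spec_intersection_with_sums; infer_instance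

-- ===== CLAIM (what is proved, stated in full; the proofs are below) =====
def Claim_equal_intersection_with_sums : Prop := ∀ (lst1 : List (Int × Int)) (lst2 : List (Int × Int)), Dom_intersection_with_sums lst1 lst2 → Spec_intersection_with_sums lst1 lst2 (intersection_with_sums lst1 lst2)

-- ===== LEMMAS AND PROOFS =====

-- the one element A contributes for an enumerated entry (i, coord) of lst1, if any
def pvG (lst2 : List (Int × Int)) (ic : Int × (Int × Int)) : Option (Int × ((Int × Int) × Int)) :=
  match PySem.List.index? lst2 ic.2 with
  | some j => if (j : Int) > 0 then some (ic.1, (ic.2, ic.1 + (j : Int))) else none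
  | none => none

-- A's target, keyed by the lst1 index
def pvT (lst1 : List (Int × Int)) (lst2 : List (Int × Int)) : List (Int × ((Int × Int) × Int)) :=
  (PySem.List.enumerate lst1 0).filterMap (pvG lst2)

-- A's loop is the map-snd of the keyed target
theorem pvA_loop (lst2 : List (Int × Int)) (l : List (Int × (Int × Int))) (acc : List ((Int × Int) × Int)) :
    l.foldl (fun common_points ic =>
      match PySem.List.index? lst2 ic.2 with
      | some j => if (j : Int) > 0 then common_points ++ [(ic.2, ic.1 + (j : Int))] else common_points
      | none => common_points) acc = acc ++ (l.filterMap (pvG lst2)).map (·.2) := by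
  induction l generalizing acc with
  | nil => simp
  | cons p ps ih =>
    rw [List.foldl_cons, List.filterMap_cons, ih]
    unfold pvG
    cases hk : PySem.List.index? lst2 p.2 with
    | none => simp
    | some j =>
      by_cases hj : (j : Int) > 0
      · have hj' : 0 < j := by exact_mod_cast hj
        simp [hj']
      · have hj' : ¬ 0 < j := by exact_mod_cast hj
        simp [hj']

-- the items of the setdefault fold, computed structurally (proof-side helper)
def pvFirsts : List (Int × Int) → Int → List (Int × Int) → List ((Int × Int) × Int)
  | [], _, _ => []
  | c :: t, s, ks => if c ∈ ks then pvFirsts t (s + 1) ks else (c, s) :: pvFirsts t (s + 1) (ks ++ [c])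

theorem pvFirst_items (l : List (Int × Int)) (s : Int) (d : PySem.Dict (Int × Int) Int) :
    ((PySem.List.enumerate l s).foldl (fun d jc => d.setdefault jc.2 jc.1) d).items
      = d.items ++ pvFirsts l s d.keys := by
  induction l generalizing s d with
  | nil => simp [pvFirsts, PySem.List.enumerate_nil]
  | cons c t ih =>
    rw [PySem.List.enumerate_cons, List.foldl_cons]
    have hstep : d.setdefault (s, c).2 (s, c).1 = d.setdefault c s := rfl
    rw [hstep]
    by_cases hc : c ∈ d.keys
    · have hcon : d.contains c = true := by
        rw [PySem.Dict.contains_eq_decide_mem_keys]; simpa using hc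
      rw [PySem.Dict.setdefault_of_contains d s hcon, ih]
      simp [pvFirsts, hc]
    · have hcon : d.contains c = false := by
        rw [PySem.Dict.contains_eq_decide_mem_keys]; simpa using hc
      rw [PySem.Dict.setdefault_of_not_contains d s hcon, ih,
        PySem.Dict.items_insert_of_not_contains d s hcon,
        PySem.Dict.keys_insert_of_not_contains d s hcon]
      simp [pvFirsts, hc]

-- each item of pvFirsts is a (coord, first index) fact about l
theorem pvFirsts_mem (l : List (Int × Int)) (s : Int) (ks : List (Int × Int)) (c : Int × Int) (j : Int)
    (h : (c, j) ∈ pvFirsts l s ks) : c ∉ ks ∧ ∃ k : Nat, PySem.List.index? l c = some k ∧ j = s + (k : Int) := by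
  induction l generalizing s ks with
  | nil => simp [pvFirsts] at h
  | cons c0 t ih =>
    rw [pvFirsts] at h
    by_cases h0 : c0 ∈ ks
    · rw [if_pos h0] at h
      obtain ⟨hks, k, hk, hj⟩ := ih (s + 1) ks h
      have hne : c0 ≠ c := fun he => hks (he ▸ h0)
      refine ⟨hks, k + 1, ?_, by push_cast; omega⟩
      rw [PySem.List.index?_cons_of_ne t hne, hk]; rfl
    · rw [if_neg h0] at h
      rcases List.mem_cons.mp h with he | ht
      · have hc : c = c0 := congrArg Prod.fst he
        have hj : j = s := congrArg Prod.snd he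
        subst hc; subst hj
        exact ⟨h0, 0, PySem.List.index?_cons_self c t, by simp⟩
      · obtain ⟨hks, k, hk, hj⟩ := ih (s + 1) (ks ++ [c0]) ht
        have hcks : c ∉ ks := fun hm => hks (List.mem_append_left _ hm)
        have hne : c0 ≠ c := fun he => hks (by simp [he])
        refine ⟨hcks, k + 1, ?_, by push_cast; omega⟩
        rw [PySem.List.index?_cons_of_ne t hne, hk]; rfl

-- the coords of pvFirsts are distinct
theorem pvFirsts_nodup (l : List (Int × Int)) (s : Int) (ks : List (Int × Int)) :
    ((pvFirsts l s ks).map (·.1)).Nodup := by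
  induction l generalizing s ks with
  | nil => simp [pvFirsts]
  | cons c0 t ih =>
    rw [pvFirsts]
    by_cases h0 : c0 ∈ ks
    · rw [if_pos h0]; exact ih (s + 1) ks
    · rw [if_neg h0]
      refine List.nodup_cons.mpr ⟨?_, ih (s + 1) (ks ++ [c0])⟩
      intro hm
      obtain ⟨⟨c, j⟩, hmem, hc⟩ := List.mem_map.mp hm
      obtain ⟨hks, -⟩ := pvFirsts_mem t (s + 1) (ks ++ [c0]) c j hmem
      have hc' : c = c0 := hc
      exact hks (by simp [hc'])

-- every coord of l is covered
theorem pvFirsts_cover (l : List (Int × Int)) (s : Int) (ks : List (Int × Int)) (c : Int × Int)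
    (h : c ∈ l) : c ∈ ks ∨ c ∈ (pvFirsts l s ks).map (·.1) := by
  induction l generalizing s ks with
  | nil => simp at h
  | cons c0 t ih =>
    rw [pvFirsts]
    by_cases h0 : c0 ∈ ks
    · rw [if_pos h0]
      rcases List.mem_cons.mp h with rfl | ht
      · exact Or.inl h0
      · exact ih (s + 1) ks ht
    · rw [if_neg h0]
      rcases List.mem_cons.mp h with rfl | ht
      · exact Or.inr (by simp)
      · rcases ih (s + 1) (ks ++ [c0]) ht with hk | hf
        · rcases List.mem_append.mp hk with hk | hk
          · exact Or.inl hk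
          · exact Or.inr (by simp at hk; simp [hk])
        · exact Or.inr (List.mem_cons_of_mem _ hf)

-- occ's lookup lists all lst1 indices of a coord, in order
theorem pvOcc_getD (lst1 : List (Int × Int)) (c : Int × Int) :
    (pvOcc lst1).getD c []
      = ((PySem.List.enumerate lst1 0).filter (fun ic => ic.2 == c)).map (·.1) := by
  have hswap : pvOcc lst1
      = ((PySem.List.enumerate lst1 0).map Prod.swap).foldl
          (fun d p => d.modify p.1 [] (· ++ [p.2])) PySem.Dict.empty := by
    rw [pvOcc, List.foldl_map]
    rfl
  rw [hswap, PySem.Dict.getD_foldl_modify_append, List.filter_map, List.map_map]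
  simp [Function.comp_def, Prod.swap]

-- filter-coord then decorate = filterMap of the restricted contributor (given c's first index)
theorem pvGroup_eq (lst2 : List (Int × Int)) (c : Int × Int) (k : Nat)
    (hk : PySem.List.index? lst2 c = some k) (hpos : (k : Int) > 0)
    (l : List (Int × (Int × Int))) :
    ((l.filter (fun ic => ic.2 == c)).map (·.1)).map (fun i => (i, (c, i + (k : Int))))
      = l.filterMap (fun ic => if ic.2 = c then pvG lst2 ic else none) := by
  induction l with
  | nil => simp
  | cons p ps ih =>
    by_cases hpc : p.2 = c
    · have hg : pvG lst2 p = some (p.1, (c, p.1 + (k : Int))) := by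
        unfold pvG
        rw [hpc, hk]
        exact if_pos hpos
      have hfp : (fun ic => if ic.2 = c then pvG lst2 ic else none) p
          = some (p.1, (c, p.1 + (k : Int))) := by
        show (if p.2 = c then pvG lst2 p else none) = _
        rw [if_pos hpc, hg]
      rw [List.filter_cons_of_pos (by simpa using hpc), List.filterMap_cons_some (f := fun ic => if ic.2 = c then pvG lst2 ic else none) hfp,
        List.map_cons, List.map_cons, ih]
    · have hfn : (fun ic => if ic.2 = c then pvG lst2 ic else none) p = none := by
        show (if p.2 = c then pvG lst2 p else none) = none
        rw [if_neg hpc]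
      rw [List.filter_cons_of_neg (by simpa using hpc), List.filterMap_cons_none (f := fun ic => if ic.2 = c then pvG lst2 ic else none) hfn, ih]

-- a restricted contributor yields nothing when the first index is not positive
theorem pvGroup_nil (lst2 : List (Int × Int)) (c : Int × Int)
    (h : ∀ k : Nat, PySem.List.index? lst2 c = some k → ¬ ((k : Int) > 0))
    (l : List (Int × (Int × Int))) :
    l.filterMap (fun ic => if ic.2 = c then pvG lst2 ic else none) = [] := by
  rw [List.filterMap_eq_nil_iff]
  intro ic _
  by_cases hpc : ic.2 = c
  · rw [if_pos hpc]
    unfold pvG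
    rw [hpc]
    cases hj : PySem.List.index? lst2 c with
    | none => rfl
    | some k =>
      have hk0 : k = 0 := by have := h k hj; omega
      subst hk0
      rfl
  · rw [if_neg hpc]

-- filterMap over a filtered list = filterMap of the restricted function
theorem pvFilterMap_filter {α β : Type} (p : α → Prop) [DecidablePred p] (f : α → Option β) (l : List α) :
    (l.filter (fun x => decide (p x))).filterMap f
      = l.filterMap (fun x => if p x then f x else none) := by
  induction l with
  | nil => rfl
  | cons x t ih =>
    by_cases hx : p x
    · rw [List.filter_cons_of_pos (by simpa using hx)]
      cases hfx : f x with
      | none =>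
        have h2 : (fun x => if p x then f x else none) x = none := by simp [hx, hfx]
        rw [List.filterMap_cons_none hfx, List.filterMap_cons_none (f := fun x => if p x then f x else none) h2, ih]
      | some b =>
        have h2 : (fun x => if p x then f x else none) x = some b := by simp [hx, hfx]
        rw [List.filterMap_cons_some hfx, List.filterMap_cons_some (f := fun x => if p x then f x else none) h2, ih]
    · have h2 : (fun x => if p x then f x else none) x = none := by simp [hx]
      rw [List.filter_cons_of_neg (by simpa using hx), List.filterMap_cons_none (f := fun x => if p x then f x else none) h2, ih]

-- joining the per-coord restricted pieces over distinct covering coords is a permutation of filterMap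
theorem pvFlatMap_perm {α β κ : Type} [DecidableEq κ] (key : α → κ) (g : α → Option β) :
    ∀ (cs : List κ) (l : List α), cs.Nodup → (∀ x ∈ l, (g x).isSome → key x ∈ cs) →
    (cs.flatMap (fun c => l.filterMap (fun x => if key x = c then g x else none))).Perm (l.filterMap g) := by
  intro cs
  induction cs with
  | nil =>
    intro l _ hcov
    have hnil : l.filterMap g = [] := by
      rw [List.filterMap_eq_nil_iff]
      intro x hx
      cases hg : g x with
      | none => rfl
      | some b => exact absurd (hcov x hx (by simp [hg])) (by simp)
    rw [List.flatMap_nil, hnil]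
  | cons c cs ih =>
    intro l hnd hcov
    have hnd' := List.nodup_cons.mp hnd
    rw [List.flatMap_cons]
    have hhead : l.filterMap (fun x => if key x = c then g x else none)
        = (l.filter (fun x => decide (key x = c))).filterMap g := by
      rw [pvFilterMap_filter]
    have htail : ∀ c' ∈ cs,
        l.filterMap (fun x => if key x = c' then g x else none)
          = (l.filter (fun x => decide (¬ key x = c))).filterMap (fun x => if key x = c' then g x else none) := by
      intro c' hc'
      rw [pvFilterMap_filter (fun x => ¬ key x = c) (fun x => if key x = c' then g x else none) l]
      congr 1
      funext x
      by_cases hx : key x = c'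
      · have hxc : ¬ key x = c := by
          intro he
          have hcc : c' = c := by rw [← hx, he]
          exact hnd'.1 (hcc ▸ hc')
        rw [if_pos hx, if_pos hxc]
      · rw [if_neg hx, ite_self]
    have hflat : cs.flatMap (fun c' => l.filterMap (fun x => if key x = c' then g x else none))
        = cs.flatMap (fun c' => (l.filter (fun x => decide (¬ key x = c))).filterMap
            (fun x => if key x = c' then g x else none)) :=
      List.flatMap_congr htail
    have hcov' : ∀ x ∈ l.filter (fun x => decide (¬ key x = c)), (g x).isSome → key x ∈ cs := by
      intro x hx hg
      have hxl := List.mem_of_mem_filter hx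
      have hxc : ¬ key x = c := by simpa using List.of_mem_filter hx
      rcases List.mem_cons.mp (hcov x hxl hg) with he | hm
      · exact absurd he hxc
      · exact hm
    rw [hhead, hflat]
    have hperm2 := ih (l.filter (fun x => decide (¬ key x = c))) hnd'.2 hcov'
    have happ := hperm2.append_left ((l.filter (fun x => decide (key x = c))).filterMap g)
    refine happ.trans ?_
    rw [← List.filterMap_append]
    have hpart : ((l.filter (fun x => decide (key x = c))) ++ (l.filter (fun x => decide (¬ key x = c)))).Perm l := by
      simp only [decide_not]
      exact List.filter_append_perm _ l
    exact hpart.filterMap g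

-- the keyed target is strictly increasing in its key
theorem pvT_pairwise (lst1 : List (Int × Int)) (lst2 : List (Int × Int)) :
    (pvT lst1 lst2).Pairwise (fun a b => a.1 < b.1) := by
  have hfst : ∀ ic o, pvG lst2 ic = some o → o.1 = ic.1 := by
    intro ic o h
    unfold pvG at h
    cases hj : PySem.List.index? lst2 ic.2 with
    | none => rw [hj] at h; cases h
    | some j =>
      rw [hj] at h
      change (if (j : Int) > 0 then some (ic.1, (ic.2, ic.1 + (j : Int))) else none) = some o at h
      split_ifs at h with hp
      · cases h; rfl
  have henum := PySem.List.pairwise_lt_enumerate lst1 0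
  unfold pvT
  rw [List.pairwise_filterMap]
  refine List.Pairwise.imp (fun {a b} hab => ?_) henum
  intro x hx y hy
  rw [hfst a x hx, hfst b y hy]
  exact hab

-- B's unsorted join is a permutation of the keyed target
theorem pvOut_perm (lst1 : List (Int × Int)) (lst2 : List (Int × Int)) :
    ((pvFirst lst2).items.flatMap (fun cj =>
      if cj.2 > 0 then ((pvOcc lst1).getD cj.1 []).map (fun i => (i, (cj.1, i + cj.2))) else [])).Perm
      (pvT lst1 lst2) := by
  have hitems : (pvFirst lst2).items = pvFirsts lst2 0 [] := by
    rw [pvFirst, pvFirst_items lst2 0 PySem.Dict.empty]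
    rfl
  have hpiece : ∀ cj ∈ pvFirsts lst2 0 [],
      (if cj.2 > 0 then ((pvOcc lst1).getD cj.1 []).map (fun i => (i, (cj.1, i + cj.2))) else [])
        = (PySem.List.enumerate lst1 0).filterMap
            (fun ic => if ic.2 = cj.1 then pvG lst2 ic else none) := by
    intro cj hm
    obtain ⟨c, j⟩ := cj
    obtain ⟨-, k, hk, rfl⟩ := pvFirsts_mem lst2 0 [] c j hm
    simp only [zero_add]
    by_cases hp : (k : Int) > 0
    · rw [if_pos hp, pvOcc_getD, pvGroup_eq lst2 c k hk hp]
    · rw [if_neg hp, pvGroup_nil lst2 c (by intro k' hk'; rw [hk] at hk'; cases hk'; exact hp)]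
  have hflat : (pvFirsts lst2 0 []).flatMap (fun cj =>
      if cj.2 > 0 then ((pvOcc lst1).getD cj.1 []).map (fun i => (i, (cj.1, i + cj.2))) else [])
      = ((pvFirsts lst2 0 []).map (·.1)).flatMap (fun c =>
          (PySem.List.enumerate lst1 0).filterMap (fun ic => if ic.2 = c then pvG lst2 ic else none)) := by
    rw [List.flatMap_map]
    exact List.flatMap_congr hpiece
  rw [hitems, hflat]
  apply pvFlatMap_perm (fun ic => ic.2) (pvG lst2)
  · exact pvFirsts_nodup lst2 0 []
  · intro ic hic hg
    have hmem : ic.2 ∈ lst2 := by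
      apply (PySem.List.index?_isSome_iff lst2 ic.2).mp
      unfold pvG at hg
      cases hj : PySem.List.index? lst2 ic.2 with
      | none => rw [hj] at hg; simp at hg
      | some j => rfl
    rcases pvFirsts_cover lst2 0 [] ic.2 hmem with h | h
    · simp at h
    · exact h

-- ===== VERDICT (by name: the statement is the Claim_ definition above) =====
theorem intersection_with_sums_spec : Claim_equal_intersection_with_sums := by
  intro lst1 lst2 _
  show intersection_with_sums lst1 lst2 = intersection_with_sums_alt lst1 lst2
  rw [intersection_with_sums, pvA_loop, List.nil_append]
  simp only [intersection_with_sums_alt]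
  rw [PySem.List.sorted_eq_of_perm_of_pairwise_lt _ _ _ (pvOut_perm lst1 lst2).symm (pvT_pairwise lst1 lst2)]
  rfl
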